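-- pv_equiv track=rewrite | github.com/adinashby-vanier-college/programming-in-science-assignment-1-Luqman-Ahmed-Vanier | Assignment1.py | star_shape
-- ===== SOURCE A (Python) =====
-- def star_shape(rows):
--   star = ""
--   for i in range(rows):
--     for j in range(i + 1):
--       star += "*"
--     if i < rows - 1:
--       star  += "\n"
--   return star
-- ===== SOURCE B (Python) =====
-- def star_shape(rows):
--   return "\n".join("*" * (i + 1) for i in range(rows))
-- ===== Notes on version B (the rewrite author's own statement) =====
-- stated objective: simpler
-- what changed: Replaces the char-by-char inner append loop and the manual trailing-newline guard with closed-form string repetition per row and a single '\n'.join.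
import Mathlib
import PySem

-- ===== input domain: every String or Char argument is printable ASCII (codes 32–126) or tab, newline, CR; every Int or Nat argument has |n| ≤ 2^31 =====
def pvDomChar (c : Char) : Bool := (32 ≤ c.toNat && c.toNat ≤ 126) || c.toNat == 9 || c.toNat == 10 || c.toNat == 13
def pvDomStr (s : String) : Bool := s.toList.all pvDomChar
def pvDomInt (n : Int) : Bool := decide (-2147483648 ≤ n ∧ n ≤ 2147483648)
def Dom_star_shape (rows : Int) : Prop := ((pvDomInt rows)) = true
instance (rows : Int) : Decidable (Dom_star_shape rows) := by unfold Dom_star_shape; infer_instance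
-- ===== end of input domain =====

-- B replaces A's char-by-char inner loop and manual trailing-newline guard by
-- closed-form "*" repetition per row and a single "\n".join (objective: simpler).

-- ===== PORT A =====
def star_shape (rows : Int) : String :=
  (PySem.List.pyRange 0 rows 1).foldl (fun star i =>
    let star := (PySem.List.pyRange 0 (i + 1) 1).foldl (fun s _ => s ++ "*") star
    if i < rows - 1 then star ++ "\n" else star) ""

-- ===== PORT B =====
-- "*" * (i + 1)  (closed-form repetition)
def starRow (i : Int) : String := String.ofList (List.replicate (i + 1).toNat '*')

def star_shape_alt (rows : Int) : String :=
  PySem.Str.join "\n" ((PySem.List.pyRange 0 rows 1).map starRow)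

-- ===== PRECONDITION & SPEC =====
def Spec_star_shape (rows : Int) (out : String) : Prop := out = star_shape_alt rows
instance (rows : Int) (out : String) : Decidable (Spec_star_shape rows out) := by unfold Spec_star_shape; infer_instance

-- ===== CLAIM (what is proved, stated in full; the proofs are below) =====
def Claim_equal_star_shape : Prop := ∀ (rows : Int), Dom_star_shape rows → Spec_star_shape rows (star_shape rows)

-- ===== LEMMAS AND PROOFS =====

-- the inner char-append loop of A is string repetition
theorem foldl_star (l : List Int) (s : String) :
    l.foldl (fun s _ => s ++ "*") s = s ++ String.ofList (List.replicate l.length '*') := by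
  induction l generalizing s with
  | nil => simp
  | cons a t ih =>
      simp only [List.foldl_cons, ih, List.length_cons]
      have h1 : ("*" : String) = String.ofList ['*'] := by decide
      rw [h1, String.append_assoc, ← String.ofList_append]
      congr 2

theorem inner_loop (i : Int) (s : String) :
    (PySem.List.pyRange 0 (i + 1) 1).foldl (fun s _ => s ++ "*") s = s ++ starRow i := by
  rw [foldl_star, starRow, PySem.List.length_pyRange_one]
  norm_num

theorem chars_join_last (sep x : List Char) (l : List (List Char)) (h : l ≠ []) :
    PySem.Chars.join sep (l ++ [x]) = PySem.Chars.join sep l ++ sep ++ x := by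
  induction l with
  | nil => simp at h
  | cons a t ih =>
      cases t with
      | nil => simp [PySem.Chars.join_cons_cons, PySem.Chars.join_singleton]
      | cons b u =>
          have ih' := ih (by simp)
          rw [List.cons_append] at ih'
          simp only [List.cons_append, PySem.Chars.join_cons_cons, ih']
          simp [List.append_assoc]

theorem join_append_last (x : String) (l : List String) (h : l ≠ []) :
    PySem.Str.join "\n" (l ++ [x]) = PySem.Str.join "\n" l ++ "\n" ++ x := by
  rw [← String.toList_inj]
  simp only [PySem.Str.toList_join, List.map_append, List.map_cons, List.map_nil,
    String.toList_append]
  exact chars_join_last _ _ _ (by simpa using h)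

-- the "always newline" loop body of A (what the body does while i < rows - 1)
def gRow (s : String) (i : Int) : String := s ++ starRow i ++ "\n"

theorem fold_g_join (n : Nat) :
    (PySem.List.pyRange 0 n 1).foldl gRow "" ++ starRow n
      = PySem.Str.join "\n" ((PySem.List.pyRange 0 ((n : Int) + 1) 1).map starRow) := by
  induction n with
  | zero =>
      simp only [Nat.cast_zero]
      decide
  | succ m ih =>
      have hcast : ((m + 1 : Nat) : Int) = (m : Int) + 1 := by push_cast; ring
      have h1 : (PySem.List.pyRange 0 ((m : Int) + 1) 1)
          = PySem.List.pyRange 0 (m : Int) 1 ++ [(m : Int)] :=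
        PySem.List.pyRange_one_succ_right (by exact_mod_cast Nat.zero_le m)
      have h2 : (PySem.List.pyRange 0 ((m : Int) + 1 + 1) 1)
          = PySem.List.pyRange 0 ((m : Int) + 1) 1 ++ [(m : Int) + 1] :=
        PySem.List.pyRange_one_succ_right (by positivity)
      have hne : (PySem.List.pyRange 0 ((m : Int) + 1) 1).map starRow ≠ [] := by
        rw [h1]; simp
      rw [hcast, h2, List.map_append, List.map_cons, List.map_nil,
        join_append_last _ _ hne, ← ih, h1, List.foldl_append]
      simp [gRow, String.append_assoc]

-- the loop body of A agrees with gRow while i < rows - 1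
theorem body_eq_g (rows : Int) (l : List Int) (hl : ∀ i ∈ l, i < rows - 1) (s : String) :
    l.foldl (fun star i =>
      let star := (PySem.List.pyRange 0 (i + 1) 1).foldl (fun s _ => s ++ "*") star
      if i < rows - 1 then star ++ "\n" else star) s
    = l.foldl gRow s := by
  induction l generalizing s with
  | nil => rfl
  | cons a t ih =>
      simp only [List.foldl_cons]
      rw [if_pos (hl a (by simp)), inner_loop]
      exact ih (fun i hi => hl i (by simp [hi])) _

-- ===== VERDICT (by name: the statement is the Claim_ definition above) =====
theorem star_shape_spec : Claim_equal_star_shape := by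
  intro rows _
  show star_shape rows = star_shape_alt rows
  rcases le_or_gt rows 0 with h | h
  · simp [star_shape, star_shape_alt, PySem.List.pyRange_one_eq_nil h, PySem.Str.join]
  · obtain ⟨n, hn⟩ : ∃ n : Nat, rows = (n : Int) + 1 := by
      refine ⟨(rows - 1).toNat, ?_⟩; omega
    subst hn
    unfold star_shape star_shape_alt
    have hsplit : (PySem.List.pyRange 0 ((n : Int) + 1) 1)
        = PySem.List.pyRange 0 (n : Int) 1 ++ [(n : Int)] :=
      PySem.List.pyRange_one_succ_right (by exact_mod_cast Nat.zero_le n)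
    rw [hsplit, List.foldl_append]
    simp only [List.foldl_cons, List.foldl_nil]
    have hbody := body_eq_g ((n : Int) + 1) (PySem.List.pyRange 0 (n : Int) 1)
      (fun i hi => by have := (PySem.List.mem_pyRange_one).1 hi; omega) ""
    rw [hbody, inner_loop, if_neg (by omega), ← hsplit]
    exact fold_g_join n
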